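-- pv_equiv track=rewrite | github.com/MyatPyaePaingPie/aws-aoh-hackathon | backend/core/demo_runner.py | _map_to_mitre
-- ===== SOURCE A (Python) =====
-- def _map_to_mitre(message: str, phase: str) -> dict:
--     """Map attack message to MITRE ATT&CK techniques."""
--     message_lower = message.lower()
--
--     # Keyword-based mapping
--     if any(w in message_lower for w in ["credential", "password", "cred", "key", "token", "secret"]):
--         return {
--             "technique": "Credential Harvesting",
--             "intent": "Secret Extraction",
--             "mitre_id": "T1552.001",
--         }
--     elif any(w in message_lower for w in ["admin", "root", "sudo", "elevate", "escalat", "privilege"]):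
--         return {
--             "technique": "Privilege Escalation",
--             "intent": "Elevated Access",
--             "mitre_id": "T1078.003",
--         }
--     elif any(w in message_lower for w in ["debug", "verbose", "log", "error", "staging"]):
--         return {
--             "technique": "Information Disclosure Probe",
--             "intent": "Debug Access / Error Exploitation",
--             "mitre_id": "T1082",
--         }
--     elif any(w in message_lower for w in ["disable", "bypass", "turn off", "stop", "pause"]):
--         return {
--             "technique": "Defense Evasion",
--             "intent": "Security Control Bypass",
--             "mitre_id": "T1562.001",
--         }
--     elif any(w in message_lower for w in ["who", "what", "role", "system", "access", "connect"]):
--         return {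
--             "technique": "Network Discovery",
--             "intent": "Capability Mapping",
--             "mitre_id": "T1018",
--         }
--     else:
--         # Default based on phase
--         phase_map = {
--             "recon": ("Reconnaissance", "Information Gathering", "T1591.004"),
--             "trust": ("Social Engineering", "Trust Exploitation", "T1566.003"),
--             "probe": ("Active Scanning", "Vulnerability Probing", "T1595.002"),
--             "harvest": ("Credential Access", "Data Collection", "T1555"),
--             "escalate": ("Privilege Escalation", "Access Elevation", "T1068"),
--         }
--         tech, intent, mitre = phase_map.get(phase, ("Unknown", "Unknown", "T0000"))
--         return {"technique": tech, "intent": intent, "mitre_id": mitre}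
-- ===== SOURCE B (Python) =====
-- # Different algorithm: instead of an ordered if/elif rule scan, flatten all keywords into one
-- # keyword->priority dict and take the MINIMUM priority among keywords occurring in the message.
-- _RESULTS = [
--     {"technique": "Credential Harvesting", "intent": "Secret Extraction", "mitre_id": "T1552.001"},
--     {"technique": "Privilege Escalation", "intent": "Elevated Access", "mitre_id": "T1078.003"},
--     {"technique": "Information Disclosure Probe", "intent": "Debug Access / Error Exploitation", "mitre_id": "T1082"},
--     {"technique": "Defense Evasion", "intent": "Security Control Bypass", "mitre_id": "T1562.001"},
--     {"technique": "Network Discovery", "intent": "Capability Mapping", "mitre_id": "T1018"},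
-- ]
--
-- _KEYWORD_PRIORITY = {}
-- for _i, _kws in enumerate([
--     ["credential", "password", "cred", "key", "token", "secret"],
--     ["admin", "root", "sudo", "elevate", "escalat", "privilege"],
--     ["debug", "verbose", "log", "error", "staging"],
--     ["disable", "bypass", "turn off", "stop", "pause"],
--     ["who", "what", "role", "system", "access", "connect"],
-- ]):
--     for _w in _kws:
--         _KEYWORD_PRIORITY[_w] = _i
--
-- _PHASE_DEFAULTS = {
--     "recon": ("Reconnaissance", "Information Gathering", "T1591.004"),
--     "trust": ("Social Engineering", "Trust Exploitation", "T1566.003"),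
--     "probe": ("Active Scanning", "Vulnerability Probing", "T1595.002"),
--     "harvest": ("Credential Access", "Data Collection", "T1555"),
--     "escalate": ("Privilege Escalation", "Access Elevation", "T1068"),
-- }
--
--
-- def _map_to_mitre(message: str, phase: str) -> dict:
--     ml = message.lower()
--     matched = [p for w, p in _KEYWORD_PRIORITY.items() if w in ml]
--     if matched:
--         return dict(_RESULTS[min(matched)])
--     tech, intent, mitre = _PHASE_DEFAULTS.get(phase, ("Unknown", "Unknown", "T0000"))
--     return {"technique": tech, "intent": intent, "mitre_id": mitre}
-- ===== Notes on version B (the rewrite author's own statement) =====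
-- stated objective: alternative
-- what changed: A's ordered if/elif short-circuit dispatch is replaced by a flat keyword->priority dict built once: B collects the priorities of ALL keywords occurring in the message and returns the result for the minimum priority (min-over-matches instead of first-match branch chain), with the same phase-default dict fallback.
import Mathlib
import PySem

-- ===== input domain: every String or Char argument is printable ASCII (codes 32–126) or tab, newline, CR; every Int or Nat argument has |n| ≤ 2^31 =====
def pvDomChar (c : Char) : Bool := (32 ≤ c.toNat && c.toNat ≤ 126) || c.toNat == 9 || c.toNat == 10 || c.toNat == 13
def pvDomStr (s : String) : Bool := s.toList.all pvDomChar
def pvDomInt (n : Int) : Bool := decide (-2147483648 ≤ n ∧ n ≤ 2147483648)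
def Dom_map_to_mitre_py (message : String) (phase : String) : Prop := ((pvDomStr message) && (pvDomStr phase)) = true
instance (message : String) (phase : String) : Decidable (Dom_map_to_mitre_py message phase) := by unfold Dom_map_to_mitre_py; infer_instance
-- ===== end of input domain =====

-- B replaces A's ordered if/elif short-circuit dispatch by a flat keyword->priority table:
-- it collects the priorities of ALL keywords occurring in the message and returns the result
-- of the minimum priority (objective: alternative).

-- ===== PORT A =====
def map_to_mitre_py (message : String) (phase : String) : List (String × String) :=
  let message_lower := PySem.Str.lower message
  if (["credential", "password", "cred", "key", "token", "secret"] : List String).any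
      (fun w => PySem.Str.isIn w message_lower) then
    [("technique", "Credential Harvesting"), ("intent", "Secret Extraction"), ("mitre_id", "T1552.001")]
  else if (["admin", "root", "sudo", "elevate", "escalat", "privilege"] : List String).any
      (fun w => PySem.Str.isIn w message_lower) then
    [("technique", "Privilege Escalation"), ("intent", "Elevated Access"), ("mitre_id", "T1078.003")]
  else if (["debug", "verbose", "log", "error", "staging"] : List String).any
      (fun w => PySem.Str.isIn w message_lower) then
    [("technique", "Information Disclosure Probe"), ("intent", "Debug Access / Error Exploitation"), ("mitre_id", "T1082")]
  else if (["disable", "bypass", "turn off", "stop", "pause"] : List String).any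
      (fun w => PySem.Str.isIn w message_lower) then
    [("technique", "Defense Evasion"), ("intent", "Security Control Bypass"), ("mitre_id", "T1562.001")]
  else if (["who", "what", "role", "system", "access", "connect"] : List String).any
      (fun w => PySem.Str.isIn w message_lower) then
    [("technique", "Network Discovery"), ("intent", "Capability Mapping"), ("mitre_id", "T1018")]
  else
    let phase_map : PySem.Dict String (String × String × String) := PySem.Dict.ofList
      [("recon", ("Reconnaissance", "Information Gathering", "T1591.004")),
       ("trust", ("Social Engineering", "Trust Exploitation", "T1566.003")),
       ("probe", ("Active Scanning", "Vulnerability Probing", "T1595.002")),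
       ("harvest", ("Credential Access", "Data Collection", "T1555")),
       ("escalate", ("Privilege Escalation", "Access Elevation", "T1068"))]
    let tim := phase_map.getD phase ("Unknown", "Unknown", "T0000")
    [("technique", tim.1), ("intent", tim.2.1), ("mitre_id", tim.2.2)]

-- ===== PORT B =====
def pvResults : List (List (String × String)) :=
  [[("technique", "Credential Harvesting"), ("intent", "Secret Extraction"), ("mitre_id", "T1552.001")],
   [("technique", "Privilege Escalation"), ("intent", "Elevated Access"), ("mitre_id", "T1078.003")],
   [("technique", "Information Disclosure Probe"), ("intent", "Debug Access / Error Exploitation"), ("mitre_id", "T1082")],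
   [("technique", "Defense Evasion"), ("intent", "Security Control Bypass"), ("mitre_id", "T1562.001")],
   [("technique", "Network Discovery"), ("intent", "Capability Mapping"), ("mitre_id", "T1018")]]

-- _KEYWORD_PRIORITY in its dict insertion order (all 27 keys distinct)
def pvKeywordPriority : List (String × Nat) :=
  [("credential", 0), ("password", 0), ("cred", 0), ("key", 0), ("token", 0), ("secret", 0),
   ("admin", 1), ("root", 1), ("sudo", 1), ("elevate", 1), ("escalat", 1), ("privilege", 1),
   ("debug", 2), ("verbose", 2), ("log", 2), ("error", 2), ("staging", 2),
   ("disable", 3), ("bypass", 3), ("turn off", 3), ("stop", 3), ("pause", 3),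
   ("who", 4), ("what", 4), ("role", 4), ("system", 4), ("access", 4), ("connect", 4)]

def pvPhaseDefaults : PySem.Dict String (String × String × String) := PySem.Dict.ofList
  [("recon", ("Reconnaissance", "Information Gathering", "T1591.004")),
   ("trust", ("Social Engineering", "Trust Exploitation", "T1566.003")),
   ("probe", ("Active Scanning", "Vulnerability Probing", "T1595.002")),
   ("harvest", ("Credential Access", "Data Collection", "T1555")),
   ("escalate", ("Privilege Escalation", "Access Elevation", "T1068"))]

def map_to_mitre_py_alt (message : String) (phase : String) : List (String × String) :=
  let ml := PySem.Str.lower message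
  let matched := pvKeywordPriority.filterMap (fun wp => if PySem.Str.isIn wp.1 ml then some wp.2 else none)
  match PySem.List.min? matched (fun x => x) with
  | some p => pvResults.getD p []   -- _RESULTS[min(matched)]; the priority is always in range 0..4
  | none =>
    let tim := pvPhaseDefaults.getD phase ("Unknown", "Unknown", "T0000")
    [("technique", tim.1), ("intent", tim.2.1), ("mitre_id", tim.2.2)]

-- ===== PRECONDITION & SPEC =====
def Spec_map_to_mitre_py (message : String) (phase : String) (out : List (String × String)) : Prop := out = map_to_mitre_py_alt message phase
instance (message : String) (phase : String) (out : List (String × String)) : Decidable (Spec_map_to_mitre_py message phase out) := by unfold Spec_map_to_mitre_py; infer_instance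

-- ===== CLAIM (what is proved, stated in full; the proofs are below) =====
def Claim_equal_map_to_mitre_py : Prop := ∀ (message : String) (phase : String), Dom_map_to_mitre_py message phase → Spec_map_to_mitre_py message phase (map_to_mitre_py message phase)

-- ===== LEMMAS AND PROOFS =====

-- the five keyword groups in A's priority order
def pvGroups : List (List String) :=
  [["credential", "password", "cred", "key", "token", "secret"],
   ["admin", "root", "sudo", "elevate", "escalat", "privilege"],
   ["debug", "verbose", "log", "error", "staging"],
   ["disable", "bypass", "turn off", "stop", "pause"],
   ["who", "what", "role", "system", "access", "connect"]]

-- the flat keyword->priority table, groups tagged with increasing priorities from i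
def pvFlat : Nat → List (List String) → List (String × Nat)
  | _, [] => []
  | i, g :: gs => g.map (fun w => (w, i)) ++ pvFlat (i + 1) gs

-- index of the first group containing a keyword of ml (A's branch choice)
def pvFirst (ml : String) : List (List String) → Option Nat
  | [] => none
  | g :: gs =>
    if g.any (fun w => PySem.Str.isIn w ml) then some 0
    else (pvFirst ml gs).map (· + 1)

theorem pvKeywordPriority_eq_flat : pvKeywordPriority = pvFlat 0 pvGroups := by rfl

theorem pvFlat_mem_ge (ml : String) :
    ∀ (gs : List (List String)) (i p : Nat),
      p ∈ (pvFlat i gs).filterMap (fun wp => if PySem.Str.isIn wp.1 ml then some wp.2 else none) →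
      i ≤ p := by
  intro gs
  induction gs with
  | nil => intro i p h; simp [pvFlat] at h
  | cons g gs ih =>
    intro i p h
    simp only [pvFlat, List.filterMap_append, List.mem_append] at h
    rcases h with h | h
    · simp only [List.filterMap_map, List.mem_filterMap] at h
      obtain ⟨w, -, hw⟩ := h
      simp only [Function.comp] at hw
      split at hw
      · simp at hw; omega
      · simp at hw
    · have := ih (i + 1) p h; omega

theorem pvGroup_filterMap_replicate (ml : String) (i : Nat) :
    ∀ (g : List String),
      (g.map (fun w => (w, i))).filterMap (fun wp => if PySem.Str.isIn wp.1 ml then some wp.2 else none)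
        = List.replicate (g.countP (fun w => PySem.Str.isIn w ml)) i := by
  intro g
  induction g with
  | nil => rfl
  | cons w g ih =>
    simp only [List.map_cons, List.filterMap_cons, List.countP_cons]
    by_cases hin : PySem.Str.isIn w ml = true
    · rw [if_pos hin, if_pos hin, ih]; rfl
    · rw [if_neg hin, if_neg hin, ih]; rfl

theorem pvMin_flat (ml : String) :
    ∀ (gs : List (List String)) (i : Nat),
      PySem.List.min? ((pvFlat i gs).filterMap (fun wp => if PySem.Str.isIn wp.1 ml then some wp.2 else none)) (fun x => x)
        = (pvFirst ml gs).map (· + i) := by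
  intro gs
  induction gs with
  | nil => intro i; rfl
  | cons g gs ih =>
    intro i
    simp only [pvFlat, List.filterMap_append, pvFirst]
    rw [pvGroup_filterMap_replicate]
    by_cases h : g.any (fun w => PySem.Str.isIn w ml)
    · -- the replicated block is nonempty; the minimum is i
      have hc : 0 < g.countP (fun w => PySem.Str.isIn w ml) :=
        List.countP_pos_iff.mpr (by simpa [List.any_eq_true] using h)
      rw [if_pos h]
      set L := List.replicate (g.countP (fun w => PySem.Str.isIn w ml)) i ++
        (pvFlat (i + 1) gs).filterMap (fun wp => if PySem.Str.isIn wp.1 ml then some wp.2 else none) with hL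
      have hiL : i ∈ L := by
        rw [hL]; exact List.mem_append_left _ (List.mem_replicate.mpr ⟨by omega, rfl⟩)
      cases hm : PySem.List.min? L (fun x => x) with
      | none =>
        have := (PySem.List.min?_eq_none_iff L (fun x => x)).mp hm
        rw [this] at hiL; simp at hiL
      | some m =>
        have hmem : m ∈ L := PySem.List.min?_mem hm
        have hmi : m ≤ i := PySem.List.min?_isMin hm i hiL
        have him : i ≤ m := by
          rw [hL] at hmem
          rcases List.mem_append.mp hmem with hmem | hmem
          · exact le_of_eq (List.eq_of_mem_replicate hmem).symm
          · have := pvFlat_mem_ge ml gs (i + 1) m hmem; omega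
        have : m = i := le_antisymm hmi him
        simp [this]
    · -- no keyword of g occurs: the replicated block is empty
      have hc : g.countP (fun w => PySem.Str.isIn w ml) = 0 := by
        rw [List.countP_eq_zero]; intro w hw hin
        exact h (List.any_eq_true.mpr ⟨w, hw, hin⟩)
      rw [if_neg h, hc, List.replicate_zero, List.nil_append, ih (i + 1)]
      cases pvFirst ml gs with
      | none => rfl
      | some x => simp only [Option.map_some]; congr 1; omega

-- ===== VERDICT (by name: the statement is the Claim_ definition above) =====
theorem map_to_mitre_py_spec : Claim_equal_map_to_mitre_py := by
  intro message phase _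
  unfold Spec_map_to_mitre_py map_to_mitre_py map_to_mitre_py_alt
  simp only [pvKeywordPriority_eq_flat]
  rw [pvMin_flat (PySem.Str.lower message) pvGroups 0]
  simp only [pvGroups, pvFirst]
  split_ifs <;> rfl
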